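-- pv_equiv track=rewrite | github.com/joshanashakya/dissertation | workspace/dataset/java-python/GeeksForGeeks/1286/A/2.py | longestSubseq
-- ===== SOURCE A (Python) =====
-- def longestSubseq(s):
--     n = len(s)
--
--     # Precomputing values in three arrays
--     # pre_count_0[i] is going to store count
--     #         of 0s in prefix str[0..i-1]
--     # pre_count_1[i] is going to store count
--     #         of 1s in prefix str[0..i-1]
--     # post_count_0[i] is going to store count
--     #         of 0s in suffix str[i-1..n-1]
--     pre_count_0 = [0 for i in range(n + 2)]
--     pre_count_1 = [0 for i in range(n + 1)]
--     post_count_0 = [0 for i in range(n + 2)]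
--     pre_count_0[0] = 0
--     post_count_0[n + 1] = 0
--     pre_count_1[0] = 0
--     for j in range(1, n + 1):
--         pre_count_0[j] = pre_count_0[j - 1]
--         pre_count_1[j] = pre_count_1[j - 1]
--         post_count_0[n - j + 1] = post_count_0[n - j + 2]
--
--         if (s[j - 1] == '0'):
--             pre_count_0[j] += 1
--         else:
--             pre_count_1[j] += 1
--         if (s[n - j] == '0'):
--             post_count_0[n - j + 1] += 1
--
--     # string is made up of all 0s or all 1s
--     if (pre_count_0[n] == n or
--         pre_count_0[n] == 0):
--         return n
--
--     # Compute result using precomputed values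
--     ans = 0
--     for i in range(1, n + 1):
--         for j in range(i, n + 1, 1):
--             ans = max(pre_count_0[i - 1] +
--                       pre_count_1[j] -
--                       pre_count_1[i - 1] +
--                       post_count_0[j + 1], ans)
--     return ans
-- ===== SOURCE B (Python) =====
-- def longestSubseq(s):
--     # One O(n) pass: count zeros z, then scan keeping the running maximum of
--     # (zeros - ones) over prefixes; the best 0s-1s-0s split ending a 1-block at
--     # position j scores best_prefix + ones(j) + (z - zeros(j)).
--     n = len(s)
--     z = sum(1 for c in s if c == '0')
--     if z == n or z == 0:
--         return n
--     ans = 0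
--     pre0 = 0
--     pre1 = 0
--     best = 0
--     for c in s:
--         if pre0 - pre1 > best:
--             best = pre0 - pre1
--         if c == '0':
--             pre0 += 1
--         else:
--             pre1 += 1
--         cand = best + pre1 + z - pre0
--         if cand > ans:
--             ans = cand
--     return ans
-- ===== Notes on version B (the rewrite author's own statement) =====
-- stated objective: faster
-- what changed: Replaces the three precomputed count arrays and the O(n^2) double loop over pairs (i,j) with a single O(n) left-to-right scan that keeps a running maximum of (zeros-ones) over prefixes, plus a total-zeros count.
import Mathlib
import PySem

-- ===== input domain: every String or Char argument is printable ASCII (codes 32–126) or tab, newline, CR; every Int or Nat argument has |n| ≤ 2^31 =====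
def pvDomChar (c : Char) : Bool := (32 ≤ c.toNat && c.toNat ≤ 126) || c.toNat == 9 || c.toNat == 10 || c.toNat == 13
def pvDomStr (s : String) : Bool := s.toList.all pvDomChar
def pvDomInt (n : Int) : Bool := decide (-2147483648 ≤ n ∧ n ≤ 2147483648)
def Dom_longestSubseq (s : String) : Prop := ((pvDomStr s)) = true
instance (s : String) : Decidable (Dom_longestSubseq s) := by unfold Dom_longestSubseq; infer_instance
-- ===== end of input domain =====

-- B replaces A's three precomputed count arrays and O(n^2) double loop by one O(n) scan
-- keeping a running maximum of (zeros - ones) over prefixes (measured asymptotically faster).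


-- ===== PORT A =====
-- Literal port of A: builds pre_count_0 / pre_count_1 / post_count_0 by index assignment
-- (indices are always in range here, so pySetD/pyGetD are exact), then the O(n^2) double loop.
def longestSubseq (s : String) : Int :=
  let cs := s.toList
  let n : Int := cs.length
  let pre0 : List Int := (PySem.List.pyRange 0 (n + 2) 1).map (fun _ => 0)
  let pre1 : List Int := (PySem.List.pyRange 0 (n + 1) 1).map (fun _ => 0)
  let post0 : List Int := (PySem.List.pyRange 0 (n + 2) 1).map (fun _ => 0)
  let pre0 := PySem.List.pySetD pre0 0 0
  let post0 := PySem.List.pySetD post0 (n + 1) 0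
  let pre1 := PySem.List.pySetD pre1 0 0
  let st := (PySem.List.pyRange 1 (n + 1) 1).foldl (fun (st : List Int × List Int × List Int) j =>
    let pre0 := PySem.List.pySetD st.1 j (PySem.List.pyGetD st.1 (j - 1) 0)
    let pre1 := PySem.List.pySetD st.2.1 j (PySem.List.pyGetD st.2.1 (j - 1) 0)
    let post0 := PySem.List.pySetD st.2.2 (n - j + 1) (PySem.List.pyGetD st.2.2 (n - j + 2) 0)
    let pr := if PySem.List.pyGetD cs (j - 1) ' ' = '0'
      then (PySem.List.pySetD pre0 j (PySem.List.pyGetD pre0 j 0 + 1), pre1)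
      else (pre0, PySem.List.pySetD pre1 j (PySem.List.pyGetD pre1 j 0 + 1))
    let post0 := if PySem.List.pyGetD cs (n - j) ' ' = '0'
      then PySem.List.pySetD post0 (n - j + 1) (PySem.List.pyGetD post0 (n - j + 1) 0 + 1)
      else post0
    (pr.1, pr.2, post0)) (pre0, pre1, post0)
  if PySem.List.pyGetD st.1 n 0 = n ∨ PySem.List.pyGetD st.1 n 0 = 0 then n
  else
    (PySem.List.pyRange 1 (n + 1) 1).foldl (fun ans i =>
      (PySem.List.pyRange i (n + 1) 1).foldl (fun ans j =>
        max (PySem.List.pyGetD st.1 (i - 1) 0 + PySem.List.pyGetD st.2.1 j 0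
             - PySem.List.pyGetD st.2.1 (i - 1) 0 + PySem.List.pyGetD st.2.2 (j + 1) 0) ans) ans) 0

-- ===== PORT B =====
-- Literal port of B: count zeros, then one scan with state (pre0, pre1, best, ans).
def longestSubseq_alt (s : String) : Int :=
  let cs := s.toList
  let n : Int := cs.length
  let z : Int := cs.foldl (fun acc c => if c = '0' then acc + 1 else acc) 0
  if z = n ∨ z = 0 then n
  else
    let st := cs.foldl (fun (st : Int × Int × Int × Int) c =>
      let best := if st.1 - st.2.1 > st.2.2.1 then st.1 - st.2.1 else st.2.2.1
      let pr := if c = '0' then (st.1 + 1, st.2.1) else (st.1, st.2.1 + 1)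
      let cand := best + pr.2 + z - pr.1
      let ans := if cand > st.2.2.2 then cand else st.2.2.2
      (pr.1, pr.2, best, ans)) (0, 0, 0, 0)
    st.2.2.2

-- ===== PRECONDITION & SPEC =====
def Spec_longestSubseq (s : String) (out : Int) : Prop := out = longestSubseq_alt s
instance (s : String) (out : Int) : Decidable (Spec_longestSubseq s out) := by unfold Spec_longestSubseq; infer_instance

-- ===== CLAIM (what is proved, stated in full; the proofs are below) =====
def Claim_equal_longestSubseq : Prop := ∀ (s : String), Dom_longestSubseq s → Spec_longestSubseq s (longestSubseq s)

-- ===== LEMMAS AND PROOFS =====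

-- ---- arithmetic views of the two programs ----

-- number of '0' among the first k characters, as an Int
def pvP0 (cs : List Char) (k : Nat) : Int := ((cs.take k).countP (fun c => c == '0') : Int)

-- F k = zeros(k) - ones(k) over the prefix of length k (with ones = k - zeros)
def pvF (cs : List Char) (k : Nat) : Int := 2 * pvP0 cs k - k

def pvZ (cs : List Char) : Int := pvP0 cs cs.length

-- running maximum of pvF over prefixes (B's "best")
def pvBst (cs : List Char) : Nat → Int
  | 0 => 0
  | t + 1 => max (pvBst cs t) (pvF cs t)

-- B's "ans" after t iterations
def pvAns (cs : List Char) : Nat → Int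
  | 0 => 0
  | t + 1 => max (pvAns cs t) (pvBst cs (t + 1) - pvF cs (t + 1) + pvZ cs)

-- A's double loop, with the array reads replaced by their values
def pvTri (cs : List Char) : Int :=
  (PySem.List.pyRange 1 ((cs.length : Int) + 1) 1).foldl (fun ans i =>
    (PySem.List.pyRange i ((cs.length : Int) + 1) 1).foldl (fun ans j =>
      max (pvF cs (i - 1).toNat - pvF cs j.toNat + pvZ cs) ans) ans) 0

-- A's loop body and initial state, named so the invariant lemma can speak about them
def pvAstep (cs : List Char) (n : Int) : (List Int × List Int × List Int) → Int → (List Int × List Int × List Int) :=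
  fun st j =>
    let pre0 := PySem.List.pySetD st.1 j (PySem.List.pyGetD st.1 (j - 1) 0)
    let pre1 := PySem.List.pySetD st.2.1 j (PySem.List.pyGetD st.2.1 (j - 1) 0)
    let post0 := PySem.List.pySetD st.2.2 (n - j + 1) (PySem.List.pyGetD st.2.2 (n - j + 2) 0)
    let pr := if PySem.List.pyGetD cs (j - 1) ' ' = '0'
      then (PySem.List.pySetD pre0 j (PySem.List.pyGetD pre0 j 0 + 1), pre1)
      else (pre0, PySem.List.pySetD pre1 j (PySem.List.pyGetD pre1 j 0 + 1))
    let post0 := if PySem.List.pyGetD cs (n - j) ' ' = '0'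
      then PySem.List.pySetD post0 (n - j + 1) (PySem.List.pyGetD post0 (n - j + 1) 0 + 1)
      else post0
    (pr.1, pr.2, post0)

def pvAinit (n : Int) : List Int × List Int × List Int :=
  (PySem.List.pySetD ((PySem.List.pyRange 0 (n + 2) 1).map (fun _ => 0)) 0 0,
   PySem.List.pySetD ((PySem.List.pyRange 0 (n + 1) 1).map (fun _ => 0)) 0 0,
   PySem.List.pySetD ((PySem.List.pyRange 0 (n + 2) 1).map (fun _ => 0)) (n + 1) 0)

-- ---- small list helpers ----

theorem pv_getD_set (xs : List Int) (i k : Nat) (v d : Int) :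
    (xs.set i v).getD k d = if i = k ∧ i < xs.length then v else xs.getD k d := by
  simp only [List.getD_eq_getElem?_getD, List.getElem?_set]
  split_ifs with h1 h2 h3 <;> simp_all <;> omega

theorem pv_getD_all_zero (l : List Int) (h : ∀ x ∈ l, x = 0) (k : Nat) : l.getD k 0 = 0 := by
  rw [List.getD_eq_getElem?_getD]
  cases hx : l[k]? with
  | none => rfl
  | some y => simp [h y (List.mem_of_getElem? hx)]

-- ---- prefix-count facts ----

theorem pvP0_zero (cs : List Char) : pvP0 cs 0 = 0 := by simp [pvP0]

theorem pvF_zero (cs : List Char) : pvF cs 0 = 0 := by simp [pvF, pvP0_zero]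

theorem pvP0_succ (cs : List Char) (m : Nat) (h : m < cs.length) :
    pvP0 cs (m + 1) = pvP0 cs m + if cs.getD m ' ' = '0' then 1 else 0 := by
  unfold pvP0
  rw [List.take_succ, List.getElem?_eq_getElem h, List.getD_eq_getElem cs ' ' h]
  simp only [Option.toList_some, List.countP_append, List.countP_singleton]
  split_ifs with hc <;> simp_all

-- ---- fold-max toolbox ----

theorem pvMfold_ge_init {β : Type} (f : β → Int) (l : List β) (a : Int) :
    a ≤ l.foldl (fun acc x => max (f x) acc) a := by
  induction l generalizing a with
  | nil => simp
  | cons x t ih => exact le_trans (le_max_right (f x) a) (ih _)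

theorem pvMfold_ge_elem {β : Type} (f : β → Int) (l : List β) (a : Int) {x : β} (hx : x ∈ l) :
    f x ≤ l.foldl (fun acc x => max (f x) acc) a := by
  induction l generalizing a with
  | nil => cases hx
  | cons y t ih =>
    rcases List.mem_cons.mp hx with h | h
    · subst h; exact le_trans (le_max_left (f x) a) (pvMfold_ge_init f t _)
    · exact ih _ h

theorem pvMfold_le {β : Type} (f : β → Int) (l : List β) {a b : Int} (ha : a ≤ b)
    (h : ∀ x ∈ l, f x ≤ b) : l.foldl (fun acc x => max (f x) acc) a ≤ b := by
  induction l generalizing a with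
  | nil => simpa
  | cons x t ih =>
    exact ih (max_le (h x (List.mem_cons_self)) ha) (fun y hy => h y (List.mem_cons_of_mem _ hy))

-- nested (triangle) versions, matching pvTri's shape
theorem pvDfold_ge_init (g : Int → Int → Int) (hi : Int) (l : List Int) (a : Int) :
    a ≤ l.foldl (fun ans i => (PySem.List.pyRange i hi 1).foldl (fun ans j => max (g i j) ans) ans) a := by
  induction l generalizing a with
  | nil => simp
  | cons x t ih => exact le_trans (pvMfold_ge_init _ _ _) (ih _)

theorem pvDfold_ge_elem (g : Int → Int → Int) (hi : Int) (l : List Int) (a : Int) {i j : Int}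
    (hil : i ∈ l) (hj : j ∈ PySem.List.pyRange i hi 1) :
    g i j ≤ l.foldl (fun ans i => (PySem.List.pyRange i hi 1).foldl (fun ans j => max (g i j) ans) ans) a := by
  induction l generalizing a with
  | nil => cases hil
  | cons y t ih =>
    rcases List.mem_cons.mp hil with h | h
    · subst h
      exact le_trans (pvMfold_ge_elem _ _ _ hj) (pvDfold_ge_init g hi t _)
    · exact ih _ h

theorem pvDfold_le (g : Int → Int → Int) (hi : Int) (l : List Int) {a b : Int} (ha : a ≤ b)
    (h : ∀ i ∈ l, ∀ j ∈ PySem.List.pyRange i hi 1, g i j ≤ b) :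
    l.foldl (fun ans i => (PySem.List.pyRange i hi 1).foldl (fun ans j => max (g i j) ans) ans) a ≤ b := by
  induction l generalizing a with
  | nil => simpa
  | cons x t ih =>
    exact ih (pvMfold_le _ _ ha (h x (List.mem_cons_self))) (fun i hi' => h i (List.mem_cons_of_mem _ hi'))

-- ---- facts about pvBst / pvAns ----

theorem pvBst_ge (cs : List Char) {k t : Nat} (h : k < t) : pvF cs k ≤ pvBst cs t := by
  induction t with
  | zero => omega
  | succ t ih =>
    rcases Nat.lt_succ_iff_lt_or_eq.mp h with h' | h'
    · exact le_trans (ih h') (le_max_left _ _)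
    · subst h'; exact le_max_right _ _

theorem pvBst_achieved (cs : List Char) {t : Nat} (h : 1 ≤ t) :
    ∃ k, k < t ∧ pvBst cs t = pvF cs k := by
  induction t with
  | zero => omega
  | succ t ih =>
    cases Nat.eq_zero_or_pos t with
    | inl h0 =>
      subst h0
      exact ⟨0, by omega, by simp [pvBst, pvF_zero]⟩
    | inr hpos =>
      obtain ⟨k, hk, he⟩ := ih hpos
      rcases max_cases (pvBst cs t) (pvF cs t) with ⟨hm, _⟩ | ⟨hm, _⟩
      · exact ⟨k, by omega, by rw [pvBst, hm, he]⟩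
      · exact ⟨t, by omega, by rw [pvBst, hm]⟩

theorem pvAns_nonneg (cs : List Char) (t : Nat) : 0 ≤ pvAns cs t := by
  induction t with
  | zero => simp [pvAns]
  | succ t ih => exact le_trans ih (le_max_left _ _)

theorem pvAns_ge (cs : List Char) {j t : Nat} (h1 : 1 ≤ j) (h2 : j ≤ t) :
    pvBst cs j - pvF cs j + pvZ cs ≤ pvAns cs t := by
  induction t with
  | zero => omega
  | succ t ih =>
    by_cases h' : j ≤ t
    · exact le_trans (ih h') (le_max_left _ _)
    · have hj : j = t + 1 := by omega
      subst hj
      exact le_max_right _ _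

-- ---- the math core: pvTri = pvAns at n ----

theorem pvTri_eq (cs : List Char) : pvTri cs = pvAns cs cs.length := by
  apply le_antisymm
  · unfold pvTri
    apply pvDfold_le _ _ _ (pvAns_nonneg cs cs.length)
    intro i hi j hj
    rw [PySem.List.mem_pyRange_one] at hi hj
    have h1 : (i - 1).toNat < j.toNat := by omega
    have h2 : 1 ≤ j.toNat := by omega
    have h3 : j.toNat ≤ cs.length := by omega
    have hb := pvBst_ge cs h1
    have ha := pvAns_ge cs h2 h3
    omega
  · suffices h : ∀ t, t ≤ cs.length → pvAns cs t ≤ pvTri cs from h cs.length le_rfl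
    intro t ht
    induction t with
    | zero =>
      unfold pvTri
      simpa [pvAns] using pvDfold_ge_init
        (fun i j => pvF cs (i - 1).toNat - pvF cs j.toNat + pvZ cs)
        ((cs.length : Int) + 1) (PySem.List.pyRange 1 ((cs.length : Int) + 1) 1) 0
    | succ t ih =>
      simp only [pvAns]
      apply max_le (ih (by omega))
      obtain ⟨k, hk, he⟩ := pvBst_achieved cs (Nat.succ_le_succ (Nat.zero_le t))
      rw [he]
      have hmem1 : ((k : Int) + 1) ∈ PySem.List.pyRange 1 ((cs.length : Int) + 1) 1 := by
        rw [PySem.List.mem_pyRange_one]; omega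
      have hmem2 : ((t : Int) + 1) ∈ PySem.List.pyRange ((k : Int) + 1) ((cs.length : Int) + 1) 1 := by
        rw [PySem.List.mem_pyRange_one]; omega
      have := pvDfold_ge_elem
        (fun i j => pvF cs (i - 1).toNat - pvF cs j.toNat + pvZ cs)
        ((cs.length : Int) + 1) (PySem.List.pyRange 1 ((cs.length : Int) + 1) 1) 0 hmem1 hmem2
      have e1 : ((k : Int) + 1 - 1).toNat = k := by omega
      have e2 : ((t : Int) + 1).toNat = t + 1 := by omega
      unfold pvTri
      simpa [e1, e2] using this

-- ---- B characterization ----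

theorem pv_if_gt (a b : Int) : (if b > a then b else a) = max a b := by
  rw [max_def]; split_ifs <;> omega

theorem b_fold (cs : List Char) (m : Nat) (hm : m ≤ cs.length) :
    (cs.take m).foldl (fun (st : Int × Int × Int × Int) c =>
      let best := if st.1 - st.2.1 > st.2.2.1 then st.1 - st.2.1 else st.2.2.1
      let pr := if c = '0' then (st.1 + 1, st.2.1) else (st.1, st.2.1 + 1)
      let cand := best + pr.2 + pvZ cs - pr.1
      let ans := if cand > st.2.2.2 then cand else st.2.2.2
      (pr.1, pr.2, best, ans)) (0, 0, 0, 0)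
    = (pvP0 cs m, (m : Int) - pvP0 cs m, pvBst cs m, pvAns cs m) := by
  induction m with
  | zero => simp [pvP0_zero, pvBst, pvAns]
  | succ m ih =>
    have hm' : m < cs.length := by omega
    rw [List.take_succ, List.getElem?_eq_getElem hm', List.foldl_append, ih (by omega)]
    simp only [Option.toList_some, List.foldl_cons, List.foldl_nil]
    have hgd : cs.getD m ' ' = cs[m] := List.getD_eq_getElem cs ' ' hm'
    have hP := pvP0_succ cs m hm'
    rw [hgd] at hP
    have hbest : (if pvP0 cs m - ((m : Int) - pvP0 cs m) > pvBst cs m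
        then pvP0 cs m - ((m : Int) - pvP0 cs m) else pvBst cs m) = pvBst cs (m + 1) := by
      rw [pv_if_gt]
      have : pvP0 cs m - ((m : Int) - pvP0 cs m) = pvF cs m := by unfold pvF; omega
      rw [this]; rfl
    by_cases hc : cs[m] = '0'
    all_goals simp only [hc, if_true, if_false, hbest, Prod.mk.injEq]
    · have h1 : pvP0 cs (m + 1) = pvP0 cs m + 1 := by rw [hP]; simp [hc]
      refine ⟨by omega, by omega, trivial, ?_⟩
      rw [pv_if_gt]
      simp only [pvAns]
      congr 1
      unfold pvF
      rw [h1]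
      push_cast
      ring
    · have h1 : pvP0 cs (m + 1) = pvP0 cs m := by rw [hP]; simp [hc]
      refine ⟨by omega, by omega, trivial, ?_⟩
      rw [pv_if_gt]
      simp only [pvAns]
      congr 1
      unfold pvF
      rw [h1]
      push_cast
      ring

theorem b_eq (s : String) :
    longestSubseq_alt s =
      if pvZ s.toList = (s.toList.length : Int) ∨ pvZ s.toList = 0 then (s.toList.length : Int)
      else pvAns s.toList s.toList.length := by
  simp only [longestSubseq_alt]
  have hz : s.toList.foldl (fun acc c => if c = '0' then acc + 1 else acc) 0 = pvZ s.toList := by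
    rw [PySem.List.foldl_ite_add_one]
    unfold pvZ pvP0
    rw [List.take_length]
    norm_num
    exact List.countP_congr (fun c _ => by by_cases h : c = '0' <;> simp [h])
  rw [hz]
  have := b_fold s.toList s.toList.length le_rfl
  rw [List.take_length] at this
  rw [this]

-- ---- A characterization ----

theorem a_step (cs : List Char) (m : Nat) (hm : m < cs.length)
    (p0 p1 q0 : List Int)
    (L0 : p0.length = cs.length + 2) (L1 : p1.length = cs.length + 1) (L2 : q0.length = cs.length + 2)
    (G0 : ∀ k : Nat, p0.getD k 0 = if k ≤ m then pvP0 cs k else 0)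
    (G1 : ∀ k : Nat, p1.getD k 0 = if k ≤ m then (k : Int) - pvP0 cs k else 0)
    (G2 : ∀ k : Nat, q0.getD k 0 = if cs.length + 1 - m ≤ k ∧ k ≤ cs.length + 1 then pvZ cs - pvP0 cs (k - 1) else 0) :
    pvAstep cs (cs.length : Int) (p0, p1, q0) ((m : Int) + 1) =
      (p0.set (m + 1) (pvP0 cs (m + 1)),
       p1.set (m + 1) (((m + 1 : Nat) : Int) - pvP0 cs (m + 1)),
       q0.set (cs.length - m) (pvZ cs - pvP0 cs (cs.length - m - 1))) := by
  have c1 : (m : Int) + 1 - 1 = ((m : Nat) : Int) := by omega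
  have c3 : (cs.length : Int) - ((m : Int) + 1) + 1 = ((cs.length - m : Nat) : Int) := by omega
  have c4 : (cs.length : Int) - ((m : Int) + 1) + 2 = ((cs.length - m + 1 : Nat) : Int) := by omega
  have c5 : (cs.length : Int) - ((m : Int) + 1) = ((cs.length - m - 1 : Nat) : Int) := by omega
  have c2 : (m : Int) + 1 = ((m + 1 : Nat) : Int) := by push_cast; ring
  unfold pvAstep
  simp only []
  rw [c3, c4, c5, c1, c2]
  simp only [PySem.List.pySetD_natCast, PySem.List.pyGetD_natCast]
  have r0 : p0.getD m 0 = pvP0 cs m := by rw [G0, if_pos le_rfl]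
  have r1 : p1.getD m 0 = (m : Int) - pvP0 cs m := by rw [G1, if_pos le_rfl]
  have r2 : q0.getD (cs.length - m + 1) 0 = pvZ cs - pvP0 cs (cs.length - m) := by
    rw [G2, if_pos ⟨by omega, by omega⟩]
    congr 2
  rw [r0, r1, r2]
  have rr0 : (p0.set (m + 1) (pvP0 cs m)).getD (m + 1) 0 = pvP0 cs m := by
    rw [pv_getD_set, if_pos ⟨rfl, by rw [L0]; omega⟩]
  have rr1 : (p1.set (m + 1) ((m : Int) - pvP0 cs m)).getD (m + 1) 0 = (m : Int) - pvP0 cs m := by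
    rw [pv_getD_set, if_pos ⟨rfl, by rw [L1]; omega⟩]
  have rrq : (q0.set (cs.length - m) (pvZ cs - pvP0 cs (cs.length - m))).getD (cs.length - m) 0
      = pvZ cs - pvP0 cs (cs.length - m) := by
    rw [pv_getD_set, if_pos ⟨rfl, by rw [L2]; omega⟩]
  rw [rr0, rr1, rrq]
  have hP := pvP0_succ cs m hm
  have hQ := pvP0_succ cs (cs.length - m - 1) (by omega)
  rw [show cs.length - m - 1 + 1 = cs.length - m by omega] at hQ
  by_cases hc0 : cs.getD m ' ' = '0'
  · by_cases hc1 : cs.getD (cs.length - m - 1) ' ' = '0'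
    · simp only [hc0, hc1, if_true, if_false, add_zero] at hP hQ
      simp only [hc0, hc1, reduceIte, List.set_set, Prod.mk.injEq]
      refine ⟨?_, ?_, ?_⟩ <;> (try congr 1) <;> omega
    · simp only [hc0, hc1, if_true, if_false, add_zero] at hP hQ
      simp only [hc0, hc1, reduceIte, List.set_set, Prod.mk.injEq]
      refine ⟨?_, ?_, ?_⟩ <;> (try congr 1) <;> omega
  · by_cases hc1 : cs.getD (cs.length - m - 1) ' ' = '0'
    · simp only [hc0, hc1, if_true, if_false, add_zero] at hP hQ
      simp only [hc0, hc1, reduceIte, List.set_set, Prod.mk.injEq]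
      refine ⟨?_, ?_, ?_⟩ <;> (try congr 1) <;> omega
    · simp only [hc0, hc1, if_true, if_false, add_zero] at hP hQ
      simp only [hc0, hc1, reduceIte, List.set_set, Prod.mk.injEq]
      refine ⟨?_, ?_, ?_⟩ <;> (try congr 1) <;> omega

theorem a_arrays (cs : List Char) (m : Nat) (hm : m ≤ cs.length) :
    ((PySem.List.pyRange 1 ((m : Int) + 1) 1).foldl (pvAstep cs (cs.length : Int)) (pvAinit (cs.length : Int))).1.length = cs.length + 2 ∧
    ((PySem.List.pyRange 1 ((m : Int) + 1) 1).foldl (pvAstep cs (cs.length : Int)) (pvAinit (cs.length : Int))).2.1.length = cs.length + 1 ∧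
    ((PySem.List.pyRange 1 ((m : Int) + 1) 1).foldl (pvAstep cs (cs.length : Int)) (pvAinit (cs.length : Int))).2.2.length = cs.length + 2 ∧
    (∀ k : Nat, ((PySem.List.pyRange 1 ((m : Int) + 1) 1).foldl (pvAstep cs (cs.length : Int)) (pvAinit (cs.length : Int))).1.getD k 0 = if k ≤ m then pvP0 cs k else 0) ∧
    (∀ k : Nat, ((PySem.List.pyRange 1 ((m : Int) + 1) 1).foldl (pvAstep cs (cs.length : Int)) (pvAinit (cs.length : Int))).2.1.getD k 0 = if k ≤ m then (k : Int) - pvP0 cs k else 0) ∧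
    (∀ k : Nat, ((PySem.List.pyRange 1 ((m : Int) + 1) 1).foldl (pvAstep cs (cs.length : Int)) (pvAinit (cs.length : Int))).2.2.getD k 0 = if cs.length + 1 - m ≤ k ∧ k ≤ cs.length + 1 then pvZ cs - pvP0 cs (k - 1) else 0) := by
  induction m with
  | zero =>
    rw [show ((0 : Nat) : Int) + 1 = 1 from by norm_num, PySem.List.pyRange_one_eq_nil le_rfl]
    simp only [List.foldl_nil]
    have e2 : ((cs.length : Int) + 2) = ((cs.length + 2 : Nat) : Int) := by push_cast; ring
    have e1 : ((cs.length : Int) + 1) = ((cs.length + 1 : Nat) : Int) := by push_cast; ring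
    have s0 : ∀ (l : List Int), PySem.List.pySetD l 0 0 = l.set 0 0 := fun l => by
      rw [show (0 : Int) = ((0 : Nat) : Int) from rfl, PySem.List.pySetD_natCast]
    have hmem : ∀ (M : Int) (x : Int), x ∈ (PySem.List.pyRange 0 M 1).map (fun _ => (0 : Int)) → x = 0 := by
      intro M x hx
      obtain ⟨a, _, ha⟩ := List.mem_map.mp hx
      exact ha.symm
    have hzero : ∀ (M : Int) (i k : Nat),
        (((PySem.List.pyRange 0 M 1).map (fun _ => (0 : Int))).set i 0).getD k 0 = 0 := by
      intro M i k
      refine pv_getD_all_zero _ (fun x hx => ?_) k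
      rcases List.mem_or_eq_of_mem_set hx with h' | h'
      · exact hmem M x h'
      · exact h'
    have hl2 : ((PySem.List.pyRange 0 ((cs.length + 2 : Nat) : Int) 1).map (fun _ => (0 : Int))).length = cs.length + 2 := by
      rw [List.length_map, PySem.List.length_pyRange_one]; omega
    have hl1 : ((PySem.List.pyRange 0 ((cs.length + 1 : Nat) : Int) 1).map (fun _ => (0 : Int))).length = cs.length + 1 := by
      rw [List.length_map, PySem.List.length_pyRange_one]; omega
    unfold pvAinit
    rw [e2, e1]
    rw [s0, s0, PySem.List.pySetD_natCast]
    refine ⟨by simp only [List.length_set, List.length_map, PySem.List.length_pyRange_one]; omega,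
      by simp only [List.length_set, List.length_map, PySem.List.length_pyRange_one]; omega,
      by simp only [List.length_set, List.length_map, PySem.List.length_pyRange_one]; omega, ?_, ?_, ?_⟩
    · intro k
      rw [hzero]
      split_ifs with h
      · rw [show k = 0 from by omega, pvP0_zero]
      · rfl
    · intro k
      rw [hzero]
      split_ifs with h
      · rw [show k = 0 from by omega, pvP0_zero]; norm_num
      · rfl
    · intro k
      rw [hzero]
      split_ifs with h
      · rw [show k - 1 = cs.length from by omega]
        unfold pvZ
        ring
      · rfl
  | succ m ih =>
    have hm' : m < cs.length := by omega
    obtain ⟨L0, L1, L2, G0, G1, G2⟩ := ih (by omega)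
    have hsplit : PySem.List.pyRange 1 (((m + 1 : Nat) : Int) + 1) 1
        = PySem.List.pyRange 1 ((m : Int) + 1) 1 ++ [(m : Int) + 1] := by
      rw [show ((m + 1 : Nat) : Int) + 1 = ((m : Int) + 1) + 1 from by push_cast; ring]
      exact PySem.List.pyRange_one_succ_right (by omega)
    rw [hsplit, List.foldl_append, List.foldl_cons, List.foldl_nil]
    set st := (PySem.List.pyRange 1 ((m : Int) + 1) 1).foldl (pvAstep cs (cs.length : Int)) (pvAinit (cs.length : Int)) with hst
    have hstep := a_step cs m hm' st.1 st.2.1 st.2.2 L0 L1 L2 G0 G1 G2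
    rw [show (st.1, st.2.1, st.2.2) = st from rfl] at hstep
    rw [hstep]
    refine ⟨by simp [L0], by simp [L1], by simp [L2], ?_, ?_, ?_⟩
    · intro k
      rw [pv_getD_set]
      simp only [L0]
      by_cases hk : m + 1 = k
      · rw [if_pos ⟨hk, by omega⟩, if_pos (by omega), hk]
      · rw [if_neg (fun h => hk h.1), G0]
        split_ifs <;> first | rfl | omega
    · intro k
      rw [pv_getD_set]
      simp only [L1]
      by_cases hk : m + 1 = k
      · rw [if_pos ⟨hk, by omega⟩, if_pos (by omega), hk]
      · rw [if_neg (fun h => hk h.1), G1]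
        split_ifs <;> first | rfl | omega
    · intro k
      rw [pv_getD_set]
      simp only [L2]
      by_cases hk : cs.length - m = k
      · rw [if_pos ⟨hk, by omega⟩, if_pos ⟨by omega, by omega⟩, hk]
      · rw [if_neg (fun h => hk h.1), G2]
        split_ifs <;> first | rfl | omega

-- the port's loop body and initial state are definitionally pvAstep / pvAinit
theorem a_fold_eq (cs : List Char) :
    (PySem.List.pyRange 1 ((cs.length : Int) + 1) 1).foldl (fun (st : List Int × List Int × List Int) j =>
      let pre0 := PySem.List.pySetD st.1 j (PySem.List.pyGetD st.1 (j - 1) 0)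
      let pre1 := PySem.List.pySetD st.2.1 j (PySem.List.pyGetD st.2.1 (j - 1) 0)
      let post0 := PySem.List.pySetD st.2.2 ((cs.length : Int) - j + 1) (PySem.List.pyGetD st.2.2 ((cs.length : Int) - j + 2) 0)
      let pr := if PySem.List.pyGetD cs (j - 1) ' ' = '0'
        then (PySem.List.pySetD pre0 j (PySem.List.pyGetD pre0 j 0 + 1), pre1)
        else (pre0, PySem.List.pySetD pre1 j (PySem.List.pyGetD pre1 j 0 + 1))
      let post0 := if PySem.List.pyGetD cs ((cs.length : Int) - j) ' ' = '0'
        then PySem.List.pySetD post0 ((cs.length : Int) - j + 1) (PySem.List.pyGetD post0 ((cs.length : Int) - j + 1) 0 + 1)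
        else post0
      (pr.1, pr.2, post0))
      (PySem.List.pySetD ((PySem.List.pyRange 0 ((cs.length : Int) + 2) 1).map (fun _ => 0)) 0 0,
       PySem.List.pySetD ((PySem.List.pyRange 0 ((cs.length : Int) + 1) 1).map (fun _ => 0)) 0 0,
       PySem.List.pySetD ((PySem.List.pyRange 0 ((cs.length : Int) + 2) 1).map (fun _ => 0)) ((cs.length : Int) + 1) 0)
    = (PySem.List.pyRange 1 ((cs.length : Int) + 1) 1).foldl (pvAstep cs (cs.length : Int)) (pvAinit (cs.length : Int)) := rfl

theorem a_eq (s : String) :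
    longestSubseq s =
      if pvZ s.toList = (s.toList.length : Int) ∨ pvZ s.toList = 0 then (s.toList.length : Int)
      else pvTri s.toList := by
  simp only [longestSubseq]
  rw [a_fold_eq]
  obtain ⟨L0, L1, L2, G0, G1, G2⟩ := a_arrays s.toList s.toList.length le_rfl
  set ST := (PySem.List.pyRange 1 ((s.toList.length : Int) + 1) 1).foldl
    (pvAstep s.toList (s.toList.length : Int)) (pvAinit (s.toList.length : Int)) with hST
  have hc : PySem.List.pyGetD ST.1 (s.toList.length : Int) 0 = pvZ s.toList := by
    rw [PySem.List.pyGetD_natCast, G0, if_pos le_rfl]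
    rfl
  rw [hc]
  split_ifs with h
  · rfl
  · unfold pvTri
    apply PySem.List.foldl_congr_mem
    intro acc i hi
    rw [PySem.List.mem_pyRange_one] at hi
    apply PySem.List.foldl_congr_mem
    intro acc2 j hj
    rw [PySem.List.mem_pyRange_one] at hj
    obtain ⟨J, hJ⟩ : ∃ J : Nat, j = (J : Int) := ⟨j.toNat, by omega⟩
    obtain ⟨I, hI⟩ : ∃ I : Nat, i = (I : Int) := ⟨i.toNat, by omega⟩
    subst hJ hI
    have ei : (I : Int) - 1 = ((I - 1 : Nat) : Int) := by omega
    have ej1 : (J : Int) + 1 = ((J + 1 : Nat) : Int) := by omega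
    rw [ei, ej1]
    simp only [PySem.List.pyGetD_natCast, Int.toNat_natCast]
    have g0 : ST.1.getD (I - 1) 0 = pvP0 s.toList (I - 1) := by
      rw [G0, if_pos (by omega)]
    have g1a : ST.2.1.getD J 0 = (J : Int) - pvP0 s.toList J := by
      rw [G1, if_pos (by omega)]
    have g1b : ST.2.1.getD (I - 1) 0 = ((I - 1 : Nat) : Int) - pvP0 s.toList (I - 1) := by
      rw [G1, if_pos (by omega)]
    have g2 : ST.2.2.getD (J + 1) 0 = pvZ s.toList - pvP0 s.toList (J + 1 - 1) := by
      rw [G2, if_pos ⟨by omega, by omega⟩]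
    rw [g0, g1a, g1b, g2]
    congr 1
    unfold pvF
    rw [show J + 1 - 1 = J from by omega]
    omega

-- ===== VERDICT (by name: the statement is the Claim_ definition above) =====
theorem longestSubseq_spec : Claim_equal_longestSubseq := by
  intro s _
  unfold Spec_longestSubseq
  rw [a_eq, b_eq]
  split_ifs with h
  · rfl
  · exact pvTri_eq s.toList
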